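-- pv_equiv track=rewrite | github.com/guigozt700/Python-Alg1 | InterFatecs/ProblemaA-TheMayans.py | quantoVale
-- ===== SOURCE A (Python) =====
-- def quantoVale(dm):
--     soma = 0
--     for simbolo in dm:
--         if simbolo == '-':
--             soma += 5
--         elif simbolo == '.':
--             soma += 1
--     return soma
-- ===== SOURCE B (Python) =====
-- def quantoVale(dm):
--     n = len(dm)
--     if n == 0:
--         return 0
--     if n == 1:
--         c = dm[0]
--         return 5 if c == '-' else (1 if c == '.' else 0)
--     mid = n // 2
--     return quantoVale(dm[:mid]) + quantoVale(dm[mid:])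
-- ===== Notes on version B (the rewrite author's own statement) =====
-- stated objective: alternative
-- what changed: Replaces A's single left-to-right accumulator loop with a recursive divide-and-conquer: split the string in half, value each half independently, add the results (base cases: empty and single symbol).
import Mathlib
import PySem

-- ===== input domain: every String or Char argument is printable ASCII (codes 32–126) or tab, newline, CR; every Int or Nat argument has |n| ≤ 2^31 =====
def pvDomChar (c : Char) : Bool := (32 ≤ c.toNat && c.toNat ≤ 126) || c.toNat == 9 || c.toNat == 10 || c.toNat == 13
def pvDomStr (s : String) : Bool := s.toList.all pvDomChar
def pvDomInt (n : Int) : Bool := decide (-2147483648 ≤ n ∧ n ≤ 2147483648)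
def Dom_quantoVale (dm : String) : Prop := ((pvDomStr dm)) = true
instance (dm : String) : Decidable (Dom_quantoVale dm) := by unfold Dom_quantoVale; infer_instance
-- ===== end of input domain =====

-- ===== PORT A =====
-- B replaces A's single accumulator loop with a divide-and-conquer recursion on string halves (objective: alternative).
def quantoVale (dm : String) : Int :=
  dm.toList.foldl (fun soma simbolo =>
    if simbolo = '-' then soma + 5
    else if simbolo = '.' then soma + 1
    else soma) 0

-- ===== PORT B =====
-- Recursion on the character list; dm[:mid] / dm[mid:] with 0 <= mid <= len are exactly take/drop.
-- The Nat fuel (initially the length) is only a structural totality guard: each recursive call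
-- is on a strictly shorter list, so fuel = length always suffices.
def qvHalves : Nat → List Char → Int
  | 0, _ => 0
  | fuel + 1, l =>
    if l.length = 0 then 0
    else if l.length = 1 then
      (if l.headD ' ' = '-' then 5 else if l.headD ' ' = '.' then 1 else 0)
    else
      qvHalves fuel (l.take (l.length / 2)) + qvHalves fuel (l.drop (l.length / 2))

def quantoVale_alt (dm : String) : Int := qvHalves dm.toList.length dm.toList

-- ===== PRECONDITION & SPEC =====
def Spec_quantoVale (dm : String) (out : Int) : Prop := out = quantoVale_alt dm
instance (dm : String) (out : Int) : Decidable (Spec_quantoVale dm out) := by unfold Spec_quantoVale; infer_instance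

-- ===== CLAIM (what is proved, stated in full; the proofs are below) =====
def Claim_equal_quantoVale : Prop := ∀ (dm : String), Dom_quantoVale dm → Spec_quantoVale dm (quantoVale dm)

-- ===== LEMMAS AND PROOFS =====
lemma quantoVale_loop (l : List Char) (acc : Int) :
    l.foldl (fun soma simbolo =>
      if simbolo = '-' then soma + 5
      else if simbolo = '.' then soma + 1
      else soma) acc
      = acc + (l.count '-' : Int) * 5 + (l.count '.' : Int) := by
  induction l generalizing acc with
  | nil => simp
  | cons c t ih =>
    simp only [List.foldl_cons, List.count_cons, ih]
    by_cases h1 : c = '-'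
    · simp [h1]; ring
    · by_cases h2 : c = '.'
      · simp [h2]; ring
      · simp [h1, h2]

lemma qvHalves_count (fuel : Nat) (l : List Char) (hf : l.length ≤ fuel) :
    qvHalves fuel l = (l.count '-' : Int) * 5 + (l.count '.' : Int) := by
  induction fuel generalizing l with
  | zero =>
    have : l = [] := List.length_eq_zero_iff.mp (Nat.le_zero.mp hf)
    simp [this, qvHalves]
  | succ n ih =>
    rw [qvHalves]
    by_cases h0 : l.length = 0
    · simp [List.length_eq_zero_iff.mp h0]
    · by_cases h1 : l.length = 1
      · obtain ⟨c, hc⟩ := List.length_eq_one_iff.mp h1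
        subst hc
        simp only [h1, if_true, List.headD_cons]
        by_cases hm : c = '-'
        · simp [hm]
        · by_cases hd : c = '.'
          · simp [hd]
          · simp [hm, hd]
      · simp only [h0, h1, if_false]
        rw [ih _ (by simp [List.length_take]; omega),
            ih _ (by simp [List.length_drop]; omega)]
        have hsplit : ∀ d : Char, (l.take (l.length / 2)).count d + (l.drop (l.length / 2)).count d = l.count d := by
          intro d
          conv_rhs => rw [← List.take_append_drop (l.length / 2) l]
          rw [List.count_append]
        have ha := hsplit '-'
        have hb := hsplit '.'
        push_cast [← ha, ← hb]
        ring

-- ===== VERDICT (by name: the statement is the Claim_ definition above) =====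
theorem quantoVale_spec : Claim_equal_quantoVale := by
  intro dm _
  unfold Spec_quantoVale quantoVale quantoVale_alt
  rw [quantoVale_loop, qvHalves_count _ _ le_rfl]
  ring
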